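-- pv_equiv track=rewrite | github.com/saeedmhmoud100/some-pyhton-apps-2 | 31.py | lists_check
-- ===== SOURCE A (Python) =====
-- def lists_check(lst1, lst2):
--     check_items = 0
--     lst1_len = 0
--     lst2_len = 0
--     for i in lst1:
--         lst1_len += 1
--     for i in lst2:
--         lst2_len += 1
--
--     for l1 in lst1:
--         for l2 in lst2:
--             if l1 == l2:
--                 check_items += 1
--                 break
--     return 'lists are equal = ' + str(not (check_items < lst1_len or check_items < lst2_len))
-- ===== SOURCE B (Python) =====
-- def lists_check(lst1, lst2):
--     # merge-style scan: are the distinct elements of lst1 a subsequence of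
--     # the sorted distinct elements of lst2?
--     a = sorted(set(lst1))
--     b = sorted(set(lst2))
--     subset = True
--     j = 0
--     for x in a:
--         while j < len(b) and b[j] < x:
--             j += 1
--         if j == len(b) or b[j] != x:
--             subset = False
--             break
--         j += 1
--     return 'lists are equal = ' + str(subset and len(lst1) >= len(lst2))
-- ===== Notes on version B (the rewrite author's own statement) =====
-- stated objective: faster
-- what changed: Replaced the quadratic count-and-compare (for each element of lst1, scan lst2; then compare the counter against both hand-counted lengths) by sorting the distinct elements of both lists and running a single merge-style two-pointer scan to decide subset, followed by one length comparison.
import Mathlib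
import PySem

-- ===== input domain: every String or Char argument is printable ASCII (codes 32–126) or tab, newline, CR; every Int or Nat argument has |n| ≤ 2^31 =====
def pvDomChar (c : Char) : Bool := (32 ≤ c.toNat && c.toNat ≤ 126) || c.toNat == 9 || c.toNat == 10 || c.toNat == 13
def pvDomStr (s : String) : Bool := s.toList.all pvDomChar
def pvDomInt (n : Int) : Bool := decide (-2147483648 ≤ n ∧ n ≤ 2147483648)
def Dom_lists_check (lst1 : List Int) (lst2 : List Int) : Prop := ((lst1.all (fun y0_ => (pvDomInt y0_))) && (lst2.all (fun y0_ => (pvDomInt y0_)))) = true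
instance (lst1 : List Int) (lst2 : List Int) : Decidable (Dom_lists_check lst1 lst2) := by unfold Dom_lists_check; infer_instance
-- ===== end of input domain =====

-- B replaces A's quadratic match counter and hand-rolled length loops by sorting the distinct
-- elements of both lists and running one merge-style two-pointer subset scan plus a length
-- comparison (objective: faster, O(n log n) vs O(n^2)).

-- ===== PORT A =====
-- inner 'for l2 in lst2: if l1 == l2: check_items += 1; break' — contributes 1 and breaks on first match
def pvInnerA (l1 : Int) : List Int → Int
  | [] => 0
  | l2 :: rest => if l1 == l2 then 1 else pvInnerA l1 rest

def lists_check (lst1 : List Int) (lst2 : List Int) : String :=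
  let lst1_len : Int := lst1.foldl (fun acc _ => acc + 1) 0
  let lst2_len : Int := lst2.foldl (fun acc _ => acc + 1) 0
  let check_items : Int := lst1.foldl (fun acc l1 => acc + pvInnerA l1 lst2) 0
  "lists are equal = " ++
    (if !(decide (check_items < lst1_len) || decide (check_items < lst2_len)) then "True" else "False")

-- ===== PORT B =====
-- B's loop: for x in a, advance j past the b-entries below x, then demand b[j] == x.
-- Transcribed as the structural two-pointer recursion over the two sorted lists.
def pvMergeSub : List Int → List Int → Bool
  | [], _ => true
  | _ :: _, [] => false
  | x :: xs, y :: ys => if y < x then pvMergeSub (x :: xs) ys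
                        else if y == x then pvMergeSub xs ys
                        else false

def lists_check_alt (lst1 : List Int) (lst2 : List Int) : String :=
  let a := PySem.List.sorted (PySem.Set.ofList lst1) (fun x => x) false
  let b := PySem.List.sorted (PySem.Set.ofList lst2) (fun x => x) false
  "lists are equal = " ++
    (if pvMergeSub a b && decide (lst1.length ≥ lst2.length) then "True" else "False")

-- ===== PRECONDITION & SPEC =====
def Spec_lists_check (lst1 : List Int) (lst2 : List Int) (out : String) : Prop := out = lists_check_alt lst1 lst2
instance (lst1 : List Int) (lst2 : List Int) (out : String) : Decidable (Spec_lists_check lst1 lst2 out) := by unfold Spec_lists_check; infer_instance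

-- ===== CLAIM (what is proved, stated in full; the proofs are below) =====
def Claim_equal_lists_check : Prop := ∀ (lst1 : List Int) (lst2 : List Int), Dom_lists_check lst1 lst2 → Spec_lists_check lst1 lst2 (lists_check lst1 lst2)

-- ===== LEMMAS AND PROOFS =====

theorem pv_foldl_len (l : List Int) (c : Int) :
    l.foldl (fun acc _ => acc + 1) c = c + l.length := by
  induction l generalizing c with
  | nil => simp
  | cons x xs ih => simp [List.foldl, ih]; omega

theorem pv_innerA_eq (l1 : Int) (lst2 : List Int) :
    pvInnerA l1 lst2 = if l1 ∈ lst2 then 1 else 0 := by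
  induction lst2 with
  | nil => simp [pvInnerA]
  | cons y ys ih =>
    by_cases h : l1 = y
    · simp [pvInnerA, h]
    · simp [pvInnerA, h, ih]

theorem pv_count_fold (lst1 lst2 : List Int) (c : Int) :
    lst1.foldl (fun acc l1 => acc + pvInnerA l1 lst2) c
      = c + (lst1.countP (fun x => decide (x ∈ lst2)) : Int) := by
  induction lst1 generalizing c with
  | nil => simp
  | cons x xs ih =>
    rw [List.foldl_cons, pv_innerA_eq, ih, List.countP_cons]
    by_cases h : x ∈ lst2 <;> simp [h] <;> try omega

-- removing the smallest element of b from membership when every element of l exceeds it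
theorem pv_all_shift (ys : List Int) (y : Int) (l : List Int) (h : ∀ z ∈ l, z ≠ y) :
    (l.all fun z => decide (z ∈ y :: ys)) = l.all fun z => decide (z ∈ ys) := by
  induction l with
  | nil => simp
  | cons a t ih =>
    have ha := h a (by simp)
    rw [List.all_cons, List.all_cons, ih (fun z hz => h z (by simp [hz]))]
    simp [List.mem_cons, ha]

-- on strictly increasing lists the two-pointer scan decides subset membership
theorem pv_mergeSub_eq (a b : List Int) (ha : a.Pairwise (· < ·)) (hb : b.Pairwise (· < ·)) :
    pvMergeSub a b = a.all (fun x => decide (x ∈ b)) := by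
  fun_induction pvMergeSub a b with
  | case1 b => simp
  | case2 x xs => simp
  | case3 x xs y ys hlt ih =>
    rw [List.pairwise_cons] at hb
    have hne : ∀ z ∈ x :: xs, z ≠ y := by
      intro z hz
      rcases List.mem_cons.mp hz with rfl | hz'
      · omega
      · have := (List.pairwise_cons.mp ha).1 z hz'; omega
    rw [ih ha hb.2, ← pv_all_shift ys y _ hne]
  | case4 x xs y ys hlt heq ih =>
    have hxy : y = x := by simpa using heq
    subst hxy
    rw [List.pairwise_cons] at ha hb
    have hne : ∀ z ∈ xs, z ≠ y := fun z hz => by have := ha.1 z hz; omega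
    rw [ih ha.2 hb.2, List.all_cons, ← pv_all_shift ys y xs hne]
    simp [List.mem_cons]
  | case5 x xs y ys hlt heq =>
    have hxy : y ≠ x := by simpa using heq
    have hx : x ∉ y :: ys := by
      intro hmem
      rcases List.mem_cons.mp hmem with rfl | h
      · exact hxy rfl
      · have := (List.pairwise_cons.mp hb).1 x h; omega
    rw [List.all_cons, decide_eq_false hx]
    simp

theorem pv_mergeSub_main (lst1 lst2 : List Int) :
    pvMergeSub (PySem.List.sorted (PySem.Set.ofList lst1) (fun x => x) false)
               (PySem.List.sorted (PySem.Set.ofList lst2) (fun x => x) false)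
      = lst1.all (fun x => decide (x ∈ lst2)) := by
  rw [pv_mergeSub_eq _ _ (PySem.List.sorted_ofList_pairwise_lt lst1)
        (PySem.List.sorted_ofList_pairwise_lt lst2)]
  rw [Bool.eq_iff_iff]
  simp [List.all_eq_true, PySem.List.mem_sorted, PySem.Set.mem_ofList]

-- ===== VERDICT (by name: the statement is the Claim_ definition above) =====
theorem lists_check_spec : Claim_equal_lists_check := by
  intro lst1 lst2 _
  unfold Spec_lists_check lists_check lists_check_alt
  simp only [pv_foldl_len, pv_count_fold, pv_mergeSub_main, zero_add]
  set p : Int → Bool := fun x => decide (x ∈ lst2) with hp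
  congr 1
  by_cases hall : lst1.all p = true
  · have hcount : lst1.countP p = lst1.length :=
      List.countP_eq_length.mpr (by simpa [List.all_eq_true] using hall)
    have h1 : ¬ ((lst1.countP p : Int) < (lst1.length : Int)) := by omega
    by_cases hlen : lst1.length ≥ lst2.length
    · have h2 : ¬ ((lst1.countP p : Int) < (lst2.length : Int)) := by
        rw [hcount]; omega
      simp [h1, h2, hall, hlen]
    · have h2 : (lst1.countP p : Int) < (lst2.length : Int) := by
        rw [hcount]; omega
      simp [h2, hall, hlen]
  · have hne : lst1.countP p ≠ lst1.length := by
      intro h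
      apply hall
      rw [List.all_eq_true]
      intro x hx
      exact List.countP_eq_length.mp h x hx
    have hcount : lst1.countP p < lst1.length :=
      Nat.lt_of_le_of_ne List.countP_le_length hne
    have h1 : (lst1.countP p : Int) < (lst1.length : Int) := by exact_mod_cast hcount
    simp only [Bool.not_eq_true] at hall
    simp [h1, hall]
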